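-- pv_equiv track=rewrite | github.com/Gymnette/ProjetL3 | TACHES/Appli/Tache_4_methodes.py | regrouper
-- ===== SOURCE A (Python) =====
-- def regrouper(p,t=10):
--     """
--     cette fonction regroupe les intervalles de taille inferieure à t avec leurs voisins
--     """
--     i = 0
--     n = len(p)
--     while i < n-2:
--         if (p[i+1]-p[i]) < t :
--             p.pop(i+1)
--         else:
--             i+=1
--         n = len(p)
--     return p
-- ===== SOURCE B (Python) =====
-- def regrouper(p, t=10):
--     """
--     cette fonction regroupe les intervalles de taille inferieure à t avec leurs voisins
--     """
--     if len(p) <= 2: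
--         return p
--     out = [p[0]]
--     for x in p[1:len(p) - 1]:
--         if x - out[-1] >= t:
--             out.append(x)
--     out.append(p[-1])
--     p[:] = out
--     return p
-- ===== Notes on version B (the rewrite author's own statement) =====
-- stated objective: faster
-- what changed: A repeatedly pops neighbours out of the list inside a while loop (each pop shifts the tail); B does one forward pass building the output list: greedy keep/drop over p[1:-1] against the last kept element, with the first and last elements always kept.
import Mathlib
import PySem

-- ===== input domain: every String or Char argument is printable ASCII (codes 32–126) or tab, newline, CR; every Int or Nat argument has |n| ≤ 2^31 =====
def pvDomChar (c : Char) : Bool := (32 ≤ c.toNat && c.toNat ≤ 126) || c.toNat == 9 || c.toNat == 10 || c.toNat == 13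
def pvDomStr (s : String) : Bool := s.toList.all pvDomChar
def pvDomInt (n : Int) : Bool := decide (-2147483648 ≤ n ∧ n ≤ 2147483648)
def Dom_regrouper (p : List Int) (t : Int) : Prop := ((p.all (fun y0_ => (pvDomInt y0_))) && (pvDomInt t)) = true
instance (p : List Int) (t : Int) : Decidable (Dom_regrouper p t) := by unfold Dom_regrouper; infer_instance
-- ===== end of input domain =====

-- B replaces A's quadratic pop-in-a-while loop by one linear forward pass (greedy over all but the
-- last element, last always kept); both Pythons mutate p to the same final contents, equivalence is
-- proved for the returned value.

-- ===== PORT A =====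
-- A's while loop: state (p, i); pop shrinks p, else advances i.
def regrouperLoop (p : List Int) (i : Nat) (t : Int) : List Int :=
  if _h : i < p.length - 2 then
    if PySem.List.pyGetD p ((i : Int) + 1) 0 - PySem.List.pyGetD p (i : Int) 0 < t then
      match h2 : PySem.List.pop? p ((i : Int) + 1) with
      | some r => regrouperLoop r.2 i t
      | none => p
    else
      regrouperLoop p (i + 1) t
  else p
termination_by p.length - i
decreasing_by
  · have := PySem.List.length_of_pop?_eq_some p h2; omega
  · omega

def regrouper (p : List Int) (t : Int) : List Int := regrouperLoop p 0 t

-- ===== PORT B =====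
def regrouper_alt (p : List Int) (t : Int) : List Int :=
  if p.length ≤ 2 then p
  else
    let out := (PySem.List.slice p (some 1) (some ((p.length : Int) - 1))).foldl
      (fun out x => if t ≤ x - PySem.List.pyGetD out (-1) 0 then out ++ [x] else out)
      [PySem.List.pyGetD p 0 0]
    out ++ [PySem.List.pyGetD p (-1) 0]

-- ===== PRECONDITION & SPEC =====
def Spec_regrouper (p : List Int) (t : Int) (out : List Int) : Prop := out = regrouper_alt p t
instance (p : List Int) (t : Int) (out : List Int) : Decidable (Spec_regrouper p t out) := by unfold Spec_regrouper; infer_instance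

-- ===== CLAIM (what is proved, stated in full; the proofs are below) =====
def Claim_equal_regrouper : Prop := ∀ (p : List Int) (t : Int), Dom_regrouper p t → Spec_regrouper p t (regrouper p t)

-- ===== LEMMAS AND PROOFS =====

-- What A's loop does to the suffix after the current element: greedy merge, last element kept.
def tailProc (t a : Int) : List Int → List Int
  | [] => []
  | [x] => [x]
  | x :: y :: xs => if x - a < t then tailProc t a (y :: xs) else x :: tailProc t x (y :: xs)

-- Plain greedy filter (what B's fold computes on the middle part).
def gre (t a : Int) : List Int → List Int
  | [] => []
  | x :: xs => if x - a < t then gre t a xs else x :: gre t x xs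

theorem loopA_eq (t : Int) : ∀ (n : Nat) (rest : List Int), rest.length = n →
    ∀ (pre : List Int) (a : Int),
    regrouperLoop (pre ++ a :: rest) pre.length t = pre ++ a :: tailProc t a rest := by
  intro n
  induction n using Nat.strong_induction_on with
  | _ n ih =>
    intro rest hlen pre a
    match rest with
    | [] =>
      rw [regrouperLoop, tailProc]
      simp
    | [x] =>
      rw [regrouperLoop, tailProc]
      simp
    | x :: y :: xs =>
      rw [regrouperLoop]
      have hc : pre.length < (pre ++ a :: x :: y :: xs).length - 2 := by
        simp; omega
      rw [dif_pos hc]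
      have h1 : PySem.List.pyGetD (pre ++ a :: x :: y :: xs) ((pre.length : Int) + 1) 0 = x := by
        have he : ((pre.length : Int) + 1) = ((pre.length + 1 : Nat) : Int) := by push_cast; ring
        rw [he, PySem.List.pyGetD_natCast]
        simp [List.getD_eq_getElem?_getD]
      have h0 : PySem.List.pyGetD (pre ++ a :: x :: y :: xs) ((pre.length : Int)) 0 = a := by
        rw [PySem.List.pyGetD_natCast]
        simp [List.getD_eq_getElem?_getD]
      rw [h1, h0]
      by_cases hlt : x - a < t
      · rw [if_pos hlt]
        have hpop : PySem.List.pop? (pre ++ a :: x :: y :: xs) ((pre.length : Int) + 1)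
            = some ((pre ++ a :: x :: y :: xs)[pre.length + 1]'(by simp),
                (pre ++ a :: x :: y :: xs).eraseIdx (pre.length + 1)) := by
          have : ((pre.length : Int) + 1) = ((pre.length + 1 : Nat) : Int) := by push_cast; ring
          rw [this, PySem.List.pop?_natCast _ _ (by simp)]
        rw [hpop]
        have herase : (pre ++ a :: x :: y :: xs).eraseIdx (pre.length + 1) = pre ++ a :: y :: xs := by
          rw [show pre ++ a :: x :: y :: xs = (pre ++ [a]) ++ x :: y :: xs by simp,
              show pre.length + 1 = (pre ++ [a]).length by simp,
              List.eraseIdx_append_of_length_le (le_refl _)]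
          simp
        simp only [herase]
        rw [ih (y :: xs).length (by simp at hlen ⊢; omega) (y :: xs) rfl pre a]
        rw [tailProc, if_pos hlt]
      · rw [if_neg hlt]
        have hre : pre ++ a :: x :: y :: xs = (pre ++ [a]) ++ x :: y :: xs := by simp
        have hi : pre.length + 1 = (pre ++ [a]).length := by simp
        rw [hre, hi, ih (y :: xs).length (by simp at hlen ⊢; omega) (y :: xs) rfl (pre ++ [a]) x]
        rw [tailProc, if_neg hlt]
        simp

theorem tailProc_eq_gre (t : Int) : ∀ (body : List Int) (a L : Int),
    tailProc t a (body ++ [L]) = gre t a body ++ [L] := by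
  intro body
  induction body with
  | nil => intro a L; simp [tailProc, gre]
  | cons x bs ih =>
    intro a L
    match bs with
    | [] =>
      simp only [List.cons_append, List.nil_append, tailProc, gre]
      split_ifs <;> simp [gre]
    | b :: bs2 =>
      rw [show (x :: (b :: bs2)) ++ [L] = x :: b :: (bs2 ++ [L]) by simp, tailProc]
      split_ifs with h
      · rw [show b :: (bs2 ++ [L]) = (b :: bs2) ++ [L] by simp, ih a L]
        simp [gre, h]
      · rw [show b :: (bs2 ++ [L]) = (b :: bs2) ++ [L] by simp, ih x L]
        simp [gre, h]

theorem foldl_eq_gre (t : Int) : ∀ (body acc : List Int) (a : Int),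
    body.foldl (fun out x => if t ≤ x - PySem.List.pyGetD out (-1) 0 then out ++ [x] else out)
      (acc ++ [a]) = acc ++ a :: gre t a body := by
  intro body
  induction body with
  | nil => intro acc a; simp [gre]
  | cons x bs ih =>
    intro acc a
    rw [List.foldl_cons]
    have hlast : PySem.List.pyGetD (acc ++ [a]) (-1) 0 = a :=
      PySem.List.pyGetD_neg_one_append_singleton acc a 0
    rw [hlast]
    by_cases h : t ≤ x - a
    · rw [if_pos h, ih (acc ++ [a]) x, gre, if_neg (by omega)]
      simp
    · rw [if_neg h, ih acc a, gre, if_pos (by omega)]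

theorem alt_eq (t a L : Int) (body : List Int) (h : body ≠ []) :
    regrouper_alt (a :: (body ++ [L])) t = a :: (gre t a body ++ [L]) := by
  have hb1 : 1 ≤ body.length := List.length_pos_iff.mpr h
  unfold regrouper_alt
  rw [if_neg (by simp; omega)]
  show (PySem.List.slice (a :: (body ++ [L])) (some 1)
        (some (((a :: (body ++ [L])).length : Int) - 1))).foldl
      (fun out x => if t ≤ x - PySem.List.pyGetD out (-1) 0 then out ++ [x] else out)
      [PySem.List.pyGetD (a :: (body ++ [L])) 0 0]
      ++ [PySem.List.pyGetD (a :: (body ++ [L])) (-1) 0] = _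
  have hslice : PySem.List.slice (a :: (body ++ [L])) (some 1)
      (some (((a :: (body ++ [L])).length : Int) - 1)) = body := by
    have hbnd : (((a :: (body ++ [L])).length : Int) - 1) = ((body.length + 1 : Nat) : Int) := by
      simp
    rw [hbnd, show (some (1 : Int)) = some ((1 : Nat) : Int) by norm_num,
        PySem.List.slice_natCast]
    simp
  have hneg : PySem.List.pyGetD (a :: (body ++ [L])) (-1) 0 = L := by
    rw [show a :: (body ++ [L]) = (a :: body) ++ [L] by simp]
    exact PySem.List.pyGetD_neg_one_append_singleton (a :: body) L 0
  have h0 : PySem.List.pyGetD (a :: (body ++ [L])) 0 0 = a :=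
    PySem.List.pyGetD_zero_cons a (body ++ [L]) 0
  rw [hslice, hneg, h0, show ([a] : List Int) = [] ++ [a] by simp, foldl_eq_gre]
  simp

-- ===== VERDICT (by name: the statement is the Claim_ definition above) =====
theorem regrouper_spec : Claim_equal_regrouper := by
  intro p t _
  unfold Spec_regrouper
  by_cases hs : p.length ≤ 2
  · unfold regrouper regrouper_alt
    rw [if_pos hs, regrouperLoop]
    simp
    omega
  · match p with
    | a :: rest =>
      have hr2 : 2 ≤ rest.length := by simp at hs; omega
      have hrne : rest ≠ [] := by intro h; rw [h] at hr2; simp at hr2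
      obtain ⟨body, L, hbl⟩ : ∃ body L, rest = body ++ [L] :=
        ⟨rest.dropLast, rest.getLast hrne, (List.dropLast_append_getLast hrne).symm⟩
      have hbody : body ≠ [] := by
        intro h; rw [hbl, h] at hr2; simp at hr2
      have hA : regrouper (a :: rest) t = a :: tailProc t a rest := by
        unfold regrouper
        simpa using loopA_eq t rest.length rest rfl [] a
      rw [hA, hbl, tailProc_eq_gre, alt_eq t a L body hbody]
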